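-- pv_equiv track=rewrite | github.com/Must77/graphics_school_leaning | hw1/scripts/generate_report_images.py | draw_histogram_bmp
-- ===== SOURCE A (Python) =====
-- def make_canvas(width, height, color=(255, 255, 255)):
--     return [[color for _ in range(width)] for _ in range(height)]
--
-- def draw_rect(canvas, x0, y0, x1, y1, color):
--     h = len(canvas)
--     w = len(canvas[0]) if h > 0 else 0
--     x0 = max(0, min(w - 1, x0))
--     x1 = max(0, min(w - 1, x1))
--     y0 = max(0, min(h - 1, y0))
--     y1 = max(0, min(h - 1, y1))
--     if x0 > x1 or y0 > y1:
--         return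
--     for y in range(y0, y1 + 1):
--         row = canvas[y]
--         for x in range(x0, x1 + 1):
--             row[x] = color
--
-- def draw_histogram_bmp(hist, width=1024, height=512):
--     bg = (255, 255, 255)
--     axis = (40, 40, 40)
--     bar = (70, 130, 210)
--
--     canvas = make_canvas(width, height, bg)
--
--     left = 60
--     right = width - 30
--     top = 20
--     bottom = height - 50
--
--     draw_rect(canvas, left, top, left + 1, bottom, axis)
--     draw_rect(canvas, left, bottom, right, bottom + 1, axis)
--
--     max_count = max(hist) if hist else 1
--     plot_w = right - left
--     plot_h = bottom - top
--
--     for i in range(256):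
--         x0 = left + int(i * plot_w / 256)
--         x1 = left + int((i + 1) * plot_w / 256) - 1
--         if x1 < x0:
--             x1 = x0
--         bar_h = int((hist[i] / max_count) * plot_h) if max_count else 0
--         y0 = bottom - bar_h
--         draw_rect(canvas, x0, y0, x1, bottom - 1, bar)
--
--     return width, height, canvas
-- ===== SOURCE B (Python) =====
-- def draw_histogram_bmp(hist, width=1024, height=512):
--     # Scanline re-implementation: build bar/axis geometry first, then compute each
--     # pixel's color directly (bars over axes over background) instead of mutating
--     # a canvas with repeated draw_rect calls.
--     bg = (255, 255, 255)
--     axis = (40, 40, 40)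
--     bar = (70, 130, 210)
--
--     left = 60
--     right = width - 30
--     top = 20
--     bottom = height - 50
--
--     max_count = max(hist) if hist else 1
--     plot_w = right - left
--     plot_h = bottom - top
--
--     def clamp_rect(x0, y0, x1, y1):
--         cx0 = max(0, min(width - 1, x0))
--         cx1 = max(0, min(width - 1, x1))
--         cy0 = max(0, min(height - 1, y0))
--         cy1 = max(0, min(height - 1, y1))
--         return (cx0, cy0, cx1, cy1)
--
--     bars = []
--     for i in range(256):
--         x0 = left + int(i * plot_w / 256)
--         x1 = left + int((i + 1) * plot_w / 256) - 1
--         if x1 < x0: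
--             x1 = x0
--         bar_h = int((hist[i] / max_count) * plot_h) if max_count else 0
--         bars.append(clamp_rect(x0, bottom - bar_h, x1, bottom - 1))
--
--     axes = [clamp_rect(left, top, left + 1, bottom),
--             clamp_rect(left, bottom, right, bottom + 1)]
--
--     def contains(r, x, y):
--         return r[0] <= x <= r[2] and r[1] <= y <= r[3]
--
--     canvas = [[bar if any(contains(r, x, y) for r in bars)
--                else axis if any(contains(r, x, y) for r in axes)
--                else bg
--                for x in range(width)]
--               for y in range(height)]
--     return width, height, canvas
-- ===== Notes on version B (the rewrite author's own statement) =====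
-- stated objective: alternative
-- what changed: B computes the bar/axis geometry (draw_rect-clamped rectangles) first and then renders the canvas in a single scanline pass that decides each pixel's color directly (bars over axes over background), instead of A's allocating a blank canvas and mutating it with 258 draw_rect calls.
import Mathlib
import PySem

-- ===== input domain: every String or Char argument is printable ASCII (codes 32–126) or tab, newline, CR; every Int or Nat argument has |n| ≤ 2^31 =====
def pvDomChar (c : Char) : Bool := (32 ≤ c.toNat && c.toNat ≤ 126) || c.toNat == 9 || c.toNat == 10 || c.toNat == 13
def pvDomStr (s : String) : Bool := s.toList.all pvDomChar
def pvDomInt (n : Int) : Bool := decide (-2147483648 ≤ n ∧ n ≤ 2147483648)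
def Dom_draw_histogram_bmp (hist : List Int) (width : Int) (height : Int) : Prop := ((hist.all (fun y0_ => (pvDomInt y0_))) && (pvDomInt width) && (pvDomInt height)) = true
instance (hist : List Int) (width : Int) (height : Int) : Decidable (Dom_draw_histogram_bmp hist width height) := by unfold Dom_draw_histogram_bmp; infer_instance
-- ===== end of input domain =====

set_option maxRecDepth 100000

-- B re-implements the same exact picture by a scanline pass (geometry first, then one
-- color decision per pixel) instead of A's canvas mutation via repeated draw_rect calls.
-- Python's float expression int((hist[i] / max_count) * plot_h) is modelled exactly by
-- pvBarH below (IEEE-754 round-to-nearest-even at 53 bits for the division and the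
-- product; exact on the |n| ≤ 2^31 domain, where no overflow/subnormal can occur);
-- both Pythons compute that same expression, so both ports share this model.

-- round n/d to nearest integer, ties to even (n, d ≥ 1)
def pvRNE (n d : Nat) : Nat :=
  let q := n / d
  let r := n % d
  if 2 * r < d then q else if d < 2 * r then q + 1 else if q % 2 = 0 then q else q + 1

-- ⌊log2 (a/b)⌋ for a, b ≥ 1
def pvLog2Floor (a b : Nat) : Int :=
  if b ≤ a then (Nat.log2 (a / b) : Int)
  else
    let f := Nat.log2 (b / a)
    if b ≤ a * 2 ^ f then -(f : Int)
    else if b ≤ a * 2 ^ (f + 1) then -(f : Int) - 1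
    else -(f : Int) - 2

-- nearest IEEE double (as an exact rational; finite, normal range)
def pvRoundDbl (q : ℚ) : ℚ :=
  if q = 0 then 0
  else
    let a := q.num.natAbs
    let b := q.den
    let e := pvLog2Floor a b
    let shift := 52 - e
    let v : ℚ :=
      if 0 ≤ shift then ((pvRNE (a * 2 ^ shift.toNat) b : ℚ) / (2 ^ shift.toNat : ℚ))
      else ((pvRNE a (b * 2 ^ (-shift).toNat) : ℚ) * (2 ^ (-shift).toNat : ℚ))
    if q < 0 then -v else v

-- int(q): truncation toward zero
def pvTruncQ (q : ℚ) : Int := Int.tdiv q.num (q.den : Int)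

-- int((h / m) * p) in Python (double division, double product, truncation); m ≠ 0
def pvBarH (h m p : Int) : Int :=
  pvTruncQ (pvRoundDbl (pvRoundDbl ((h : ℚ) / (m : ℚ)) * (p : ℚ)))

-- ===== PORT A =====

def pvMakeCanvas (width height : Int) (c : Int × Int × Int) : List (List (Int × Int × Int)) :=
  (PySem.List.pyRange 0 height 1).map (fun _ => (PySem.List.pyRange 0 width 1).map (fun _ => c))

def pvDrawRect (canvas : List (List (Int × Int × Int))) (x0 y0 x1 y1 : Int) (c : Int × Int × Int) :
    List (List (Int × Int × Int)) :=
  let h : Int := (canvas.length : Int)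
  let w : Int := if 0 < h then ((canvas.getD 0 []).length : Int) else 0
  let x0 := max 0 (min (w - 1) x0)
  let x1 := max 0 (min (w - 1) x1)
  let y0 := max 0 (min (h - 1) y0)
  let y1 := max 0 (min (h - 1) y1)
  if x1 < x0 ∨ y1 < y0 then canvas
  else
    (PySem.List.pyRange y0 (y1 + 1) 1).foldl
      (fun cv y =>
        cv.set y.toNat
          ((PySem.List.pyRange x0 (x1 + 1) 1).foldl (fun row x => row.set x.toNat c) (cv.getD y.toNat [])))
      canvas

def draw_histogram_bmp (hist : List Int) (width : Int) (height : Int) :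
    Int × Int × (List (List (Int × Int × Int))) :=
  let bg : Int × Int × Int := (255, 255, 255)
  let axis : Int × Int × Int := (40, 40, 40)
  let bar : Int × Int × Int := (70, 130, 210)
  let canvas := pvMakeCanvas width height bg
  let left : Int := 60
  let right := width - 30
  let top : Int := 20
  let bottom := height - 50
  let canvas := pvDrawRect canvas left top (left + 1) bottom axis
  let canvas := pvDrawRect canvas left bottom right (bottom + 1) axis
  let max_count := match hist with | [] => (1 : Int) | _ :: _ => (PySem.List.max? hist id).getD 1
  let plot_w := right - left
  let plot_h := bottom - top
  let canvas := (PySem.List.pyRange 0 256 1).foldl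
    (fun cv i =>
      -- int(i * plot_w / 256): int*int is exact, |i*plot_w| < 2^53 and /256 is exact
      -- in double, so this is exact truncating division (PySem.Int.truncdiv)
      let x0 := left + PySem.Int.truncdiv (i * plot_w) 256
      let x1 := left + PySem.Int.truncdiv ((i + 1) * plot_w) 256 - 1
      let x1 := if x1 < x0 then x0 else x1
      let bar_h := if max_count ≠ 0 then pvBarH ((PySem.List.pyGet? hist i).getD 0) max_count plot_h else 0
      let y0 := bottom - bar_h
      pvDrawRect cv x0 y0 x1 (bottom - 1) bar)
    canvas
  (width, height, canvas)

-- ===== PORT B =====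

def pvClampRect (width height x0 y0 x1 y1 : Int) : Int × Int × Int × Int :=
  (max 0 (min (width - 1) x0), max 0 (min (height - 1) y0),
   max 0 (min (width - 1) x1), max 0 (min (height - 1) y1))

def pvContains (r : Int × Int × Int × Int) (x y : Int) : Bool :=
  r.1 ≤ x && x ≤ r.2.2.1 && r.2.1 ≤ y && y ≤ r.2.2.2

def draw_histogram_bmp_alt (hist : List Int) (width : Int) (height : Int) :
    Int × Int × (List (List (Int × Int × Int))) :=
  let bg : Int × Int × Int := (255, 255, 255)
  let axis : Int × Int × Int := (40, 40, 40)
  let bar : Int × Int × Int := (70, 130, 210)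
  let left : Int := 60
  let right := width - 30
  let top : Int := 20
  let bottom := height - 50
  let max_count := match hist with | [] => (1 : Int) | _ :: _ => (PySem.List.max? hist id).getD 1
  let plot_w := right - left
  let plot_h := bottom - top
  let bars := (PySem.List.pyRange 0 256 1).map
    (fun i =>
      let x0 := left + PySem.Int.truncdiv (i * plot_w) 256
      let x1 := left + PySem.Int.truncdiv ((i + 1) * plot_w) 256 - 1
      let x1 := if x1 < x0 then x0 else x1
      let bar_h := if max_count ≠ 0 then pvBarH ((PySem.List.pyGet? hist i).getD 0) max_count plot_h else 0
      pvClampRect width height x0 (bottom - bar_h) x1 (bottom - 1))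
  let axes := [pvClampRect width height left top (left + 1) bottom,
               pvClampRect width height left bottom right (bottom + 1)]
  let canvas := (PySem.List.pyRange 0 height 1).map
    (fun y => (PySem.List.pyRange 0 width 1).map
      (fun x =>
        if bars.any (fun r => pvContains r x y) then bar
        else if axes.any (fun r => pvContains r x y) then axis
        else bg))
  (width, height, canvas)

-- ===== PRECONDITION & SPEC =====
-- Pre_ excludes exactly the inputs on which the Python A raises an IndexError: width ≤ 0 or
-- height ≤ 0 (draw_rect indexes an empty canvas/row), or len(hist) < 256 while max_count is
-- truthy (the bar loop reads hist[i] for i < 256; when max_count == 0 the conditional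
-- expression short-circuits and hist[i] is never read; an empty hist gets max_count = 1).
def Pre_draw_histogram_bmp (hist : List Int) (width : Int) (height : Int) : Prop :=
  1 ≤ width ∧ 1 ≤ height ∧ (256 ≤ hist.length ∨ (PySem.List.max? hist id).getD 1 = 0)
instance (hist : List Int) (width : Int) (height : Int) : Decidable (Pre_draw_histogram_bmp hist width height) := by unfold Pre_draw_histogram_bmp; infer_instance

def pvWitness_draw_histogram_bmp : List Int × Int × Int := ([0], 5, 5)

def Spec_draw_histogram_bmp (hist : List Int) (width : Int) (height : Int) (out : Int × Int × (List (List (Int × Int × Int)))) : Prop := out = draw_histogram_bmp_alt hist width height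
instance (hist : List Int) (width : Int) (height : Int) (out : Int × Int × (List (List (Int × Int × Int)))) : Decidable (Spec_draw_histogram_bmp hist width height out) := by unfold Spec_draw_histogram_bmp; infer_instance

-- ===== CLAIM (what is proved, stated in full; the proofs are below) =====
def Claim_equal_draw_histogram_bmp : Prop := ∀ (hist : List Int) (width : Int) (height : Int), Dom_draw_histogram_bmp hist width height → Pre_draw_histogram_bmp hist width height → Spec_draw_histogram_bmp hist width height (draw_histogram_bmp hist width height)


-- ===== LEMMAS AND PROOFS =====

-- pixel accessor used by the proofs
def pvPix (cv : List (List (Int × Int × Int))) (i j : Nat) : Option (Int × Int × Int) :=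
  cv[i]?.bind (fun r => r[j]?)

-- "pixel (x, y) lies in the draw_rect-clamped rectangle", the Bool B tests
def pvCovB (w h x0 y0 x1 y1 x y : Int) : Bool :=
  pvContains (pvClampRect w h x0 y0 x1 y1) x y

-- A's bar geometry (x0, y0, x1, y1), exactly as both ports compute it
def pvParams (hist : List Int) (width height : Int) (i : Int) : Int × Int × Int × Int :=
  let left : Int := 60
  let right := width - 30
  let bottom := height - 50
  let max_count := match hist with | [] => (1 : Int) | _ :: _ => (PySem.List.max? hist id).getD 1
  let plot_w := right - left
  let plot_h := bottom - 20
  let x0 := left + PySem.Int.truncdiv (i * plot_w) 256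
  let x1 := left + PySem.Int.truncdiv ((i + 1) * plot_w) 256 - 1
  let x1 := if x1 < x0 then x0 else x1
  let bar_h := if max_count ≠ 0 then pvBarH ((PySem.List.pyGet? hist i).getD 0) max_count plot_h else 0
  (x0, bottom - bar_h, x1, bottom - 1)

lemma pvRowFold_length (c : Int × Int × Int) (l : List Int) :
    ∀ row : List (Int × Int × Int), (l.foldl (fun r x => r.set x.toNat c) row).length = row.length := by
  induction l with
  | nil => intro row; rfl
  | cons a t ih => intro row; simp [List.foldl_cons, ih]

lemma pvRowFold_getElem? (c : Int × Int × Int) :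
    ∀ (n : Nat) (a b : Int), (b - a).toNat = n → 0 ≤ a →
      ∀ (row : List (Int × Int × Int)) (j : Nat),
        ((PySem.List.pyRange a b 1).foldl (fun r x => r.set x.toNat c) row)[j]? =
          if a ≤ (j : Int) ∧ (j : Int) < b ∧ j < row.length then some c else row[j]? := by
  intro n
  induction n with
  | zero =>
    intro a b hn ha row j
    rw [PySem.List.pyRange_one_eq_nil (by omega)]
    simp only [List.foldl_nil]
    rw [if_neg (by omega)]
  | succ m ih =>
    intro a b hn ha row j
    rw [PySem.List.pyRange_one_cons (by omega), List.foldl_cons]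
    rw [ih (a + 1) b (by omega) (by omega)]
    simp only [List.length_set]
    by_cases hj : (a + 1 : Int) ≤ (j : Int) ∧ (j : Int) < b ∧ j < row.length
    · rw [if_pos hj, if_pos (by omega)]
    · rw [if_neg hj]
      by_cases hja : (j : Int) = a
      · have hja' : a.toNat = j := by omega
        by_cases hjl : j < row.length
        · rw [if_pos (by omega)]
          rw [List.getElem?_set, if_pos hja']
          rw [if_pos (by omega)]
        · rw [if_neg (by omega)]
          rw [List.getElem?_set, if_pos hja', if_neg (by omega)]
          rw [List.getElem?_eq_none (by omega)]
      · rw [if_neg (by omega)]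
        rw [List.getElem?_set, if_neg (by omega)]

lemma pvColFold_length (g : List (Int × Int × Int) → List (Int × Int × Int)) (l : List Int) :
    ∀ cv : List (List (Int × Int × Int)),
      (l.foldl (fun cv y => cv.set y.toNat (g (cv.getD y.toNat []))) cv).length = cv.length := by
  induction l with
  | nil => intro cv; rfl
  | cons a t ih => intro cv; rw [List.foldl_cons, ih]; simp

lemma pvColFold_getElem? (g : List (Int × Int × Int) → List (Int × Int × Int)) :
    ∀ (n : Nat) (a b : Int), (b - a).toNat = n → 0 ≤ a →
      ∀ (cv : List (List (Int × Int × Int))) (i : Nat),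
        ((PySem.List.pyRange a b 1).foldl (fun cv y => cv.set y.toNat (g (cv.getD y.toNat []))) cv)[i]? =
          if a ≤ (i : Int) ∧ (i : Int) < b ∧ i < cv.length then some (g (cv.getD i [])) else cv[i]? := by
  intro n
  induction n with
  | zero =>
    intro a b hn ha cv i
    rw [PySem.List.pyRange_one_eq_nil (by omega)]
    simp only [List.foldl_nil]
    rw [if_neg (by omega)]
  | succ m ih =>
    intro a b hn ha cv i
    rw [PySem.List.pyRange_one_cons (by omega), List.foldl_cons]
    rw [ih (a + 1) b (by omega) (by omega)]
    simp only [List.length_set]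
    by_cases hi : (a + 1 : Int) ≤ (i : Int) ∧ (i : Int) < b ∧ i < cv.length
    · rw [if_pos hi, if_pos (by omega)]
      have hne : ¬ (a.toNat = i) := by omega
      have hgd : (cv.set a.toNat (g (cv.getD a.toNat []))).getD i [] = cv.getD i [] := by
        simp [List.getD_eq_getElem?_getD, hne]
      rw [hgd]
    · rw [if_neg hi]
      by_cases hia : (i : Int) = a
      · have hia' : a.toNat = i := by omega
        by_cases hil : i < cv.length
        · rw [if_pos (by omega)]
          rw [List.getElem?_set, if_pos hia']
          rw [if_pos (by omega)]
          rw [hia']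
        · rw [if_neg (by omega)]
          rw [List.getElem?_set, if_pos hia', if_neg (by omega)]
          rw [List.getElem?_eq_none (by omega)]
      · rw [if_neg (by omega)]
        rw [List.getElem?_set, if_neg (by omega)]

lemma pvColFold_rowlen (W : Nat) (g : List (Int × Int × Int) → List (Int × Int × Int))
    (hg : ∀ row, (g row).length = row.length) (l : List Int) :
    ∀ cv : List (List (Int × Int × Int)), (∀ r ∈ cv, r.length = W) →
      ∀ r ∈ (l.foldl (fun cv y => cv.set y.toNat (g (cv.getD y.toNat []))) cv), r.length = W := by
  induction l with
  | nil => intro cv h; exact h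
  | cons a t ih =>
    intro cv h
    rw [List.foldl_cons]
    refine ih _ ?_
    by_cases hl : a.toNat < cv.length
    · intro r hr
      rcases List.mem_or_eq_of_mem_set hr with h1 | h1
      · exact h r h1
      · subst h1
        rw [hg]
        have : cv.getD a.toNat [] = cv[a.toNat] := List.getD_eq_getElem cv [] hl
        rw [this]
        exact h _ (List.getElem_mem hl)
    · rw [List.set_eq_of_length_le (by omega)]
      exact h

lemma pvDrawRect_length (cv : List (List (Int × Int × Int))) (x0 y0 x1 y1 : Int) (c : Int × Int × Int) :
    (pvDrawRect cv x0 y0 x1 y1 c).length = cv.length := by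
  simp only [pvDrawRect]
  split <;> split
  · rfl
  · exact pvColFold_length
      (fun row => (PySem.List.pyRange (max 0 (min (((cv.getD 0 []).length : Int) - 1) x0))
        (max 0 (min (((cv.getD 0 []).length : Int) - 1) x1) + 1) 1).foldl
          (fun row x => row.set x.toNat c) row) _ cv
  · rfl
  · exact pvColFold_length
      (fun row => (PySem.List.pyRange (max 0 (min ((0:Int) - 1) x0))
        (max 0 (min ((0:Int) - 1) x1) + 1) 1).foldl (fun row x => row.set x.toNat c) row) _ cv

lemma pvDrawRect_rowlen (W : Nat) (cv : List (List (Int × Int × Int))) (x0 y0 x1 y1 : Int)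
    (c : Int × Int × Int) (hW : ∀ r ∈ cv, r.length = W) :
    ∀ r ∈ pvDrawRect cv x0 y0 x1 y1 c, r.length = W := by
  simp only [pvDrawRect]
  split <;> split
  · exact hW
  · exact pvColFold_rowlen W
      (fun row => (PySem.List.pyRange (max 0 (min (((cv.getD 0 []).length : Int) - 1) x0))
        (max 0 (min (((cv.getD 0 []).length : Int) - 1) x1) + 1) 1).foldl
          (fun row x => row.set x.toNat c) row)
      (fun row => pvRowFold_length c _ row) _ cv hW
  · exact hW
  · exact pvColFold_rowlen W
      (fun row => (PySem.List.pyRange (max 0 (min ((0:Int) - 1) x0))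
        (max 0 (min ((0:Int) - 1) x1) + 1) 1).foldl (fun row x => row.set x.toNat c) row)
      (fun row => pvRowFold_length c _ row) _ cv hW

lemma pvDrawRect_pix (cv : List (List (Int × Int × Int))) (W H : Nat)
    (hH : cv.length = H) (hW : ∀ r ∈ cv, r.length = W) (h1 : 1 ≤ H) (w1 : 1 ≤ W)
    (x0 y0 x1 y1 : Int) (c : Int × Int × Int) (i j : Nat) (hi : i < H) (hj : j < W) :
    pvPix (pvDrawRect cv x0 y0 x1 y1 c) i j =
      if pvCovB (W : Int) (H : Int) x0 y0 x1 y1 (j : Int) (i : Int) then some c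
      else pvPix cv i j := by
  have hcv0 : cv.getD 0 [] = cv[0]'(by omega) := List.getD_eq_getElem cv [] (by omega)
  have hw0 : (cv.getD 0 []).length = W := by
    rw [hcv0]; exact hW _ (List.getElem_mem _)
  have h0 : (0 : Int) < ((H : Nat) : Int) := by exact_mod_cast h1
  simp only [pvDrawRect, hH, hw0, pvCovB, pvContains, pvClampRect, if_pos h0,
    Bool.and_eq_true, decide_eq_true_eq]
  set a0 : Int := max 0 (min ((W : Int) - 1) x0) with ha0
  set a1 : Int := max 0 (min ((W : Int) - 1) x1) with ha1
  set b0 : Int := max 0 (min ((H : Int) - 1) y0) with hb0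
  set b1 : Int := max 0 (min ((H : Int) - 1) y1) with hb1
  have ha0n : 0 ≤ a0 := le_max_left _ _
  have hb0n : 0 ≤ b0 := le_max_left _ _
  have ha1W : a1 ≤ (W : Int) - 1 := by
    rw [ha1]; rcases le_or_gt (min ((W : Int) - 1) x1) 0 with h | h
    · rw [max_eq_left h]; omega
    · rw [max_eq_right (le_of_lt h)]; exact min_le_left _ _
  have hb1H : b1 ≤ (H : Int) - 1 := by
    rw [hb1]; rcases le_or_gt (min ((H : Int) - 1) y1) 0 with h | h
    · rw [max_eq_left h]; omega
    · rw [max_eq_right (le_of_lt h)]; exact min_le_left _ _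
  by_cases hemp : a1 < a0 ∨ b1 < b0
  · rw [if_pos hemp, if_neg (by omega)]
  · rw [if_neg hemp]
    have hcol := pvColFold_getElem?
      (fun row => (PySem.List.pyRange a0 (a1 + 1) 1).foldl (fun row x => row.set x.toNat c) row)
      ((b1 + 1) - b0).toNat b0 (b1 + 1) rfl hb0n cv i
    simp only [pvPix]
    rw [hcol]
    by_cases hy : b0 ≤ (i : Int) ∧ (i : Int) ≤ b1
    · rw [if_pos (by refine ⟨hy.1, by omega, by omega⟩)]
      simp only [Option.bind_some]
      have hrow : cv.getD i [] = cv[i]'(by omega) := List.getD_eq_getElem cv [] (by omega)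
      have hrl : (cv.getD i []).length = W := by rw [hrow]; exact hW _ (List.getElem_mem _)
      rw [pvRowFold_getElem? c ((a1 + 1) - a0).toNat a0 (a1 + 1) rfl ha0n]
      rw [hrl]
      have hcvi : cv[i]? = some (cv[i]'(by omega)) := List.getElem?_eq_getElem (by omega)
      by_cases hx : a0 ≤ (j : Int) ∧ (j : Int) ≤ a1
      · rw [if_pos (by exact ⟨hx.1, by omega, by omega⟩), if_pos (by omega)]
      · rw [if_neg (by omega), if_neg (by omega), hcvi, Option.bind_some, hrow]
    · rw [if_neg (by omega), if_neg (by omega)]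

lemma pvFoldBars_pix (W H : Nat) (h1 : 1 ≤ H) (w1 : 1 ≤ W) (c : Int × Int × Int)
    (f1 f2 f3 f4 : Int → Int) :
    ∀ (l : List Int) (cv : List (List (Int × Int × Int))), cv.length = H →
      (∀ r ∈ cv, r.length = W) → ∀ (i j : Nat), i < H → j < W →
        pvPix (l.foldl (fun cv k => pvDrawRect cv (f1 k) (f2 k) (f3 k) (f4 k) c) cv) i j =
          if l.any (fun k => pvCovB (W : Int) (H : Int) (f1 k) (f2 k) (f3 k) (f4 k) (j : Int) (i : Int))
          then some c else pvPix cv i j := by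
  intro l
  induction l with
  | nil => intro cv _ _ i j _ _; simp
  | cons a t ih =>
    intro cv hlen hrow i j hi hj
    simp only [List.foldl_cons, List.any_cons]
    rw [ih _ (by rw [pvDrawRect_length]; exact hlen) (pvDrawRect_rowlen W cv _ _ _ _ _ hrow) i j hi hj]
    rw [pvDrawRect_pix cv W H hlen hrow h1 w1 _ _ _ _ c i j hi hj]
    by_cases hc : pvCovB (W : Int) (H : Int) (f1 a) (f2 a) (f3 a) (f4 a) (j : Int) (i : Int)
    · simp [hc]
    · simp [hc]

lemma pvMakeCanvas_eq (w h : Int) (c : Int × Int × Int) :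
    pvMakeCanvas w h c = List.replicate h.toNat (List.replicate w.toNat c) := by
  unfold pvMakeCanvas
  simp [PySem.List.pyRange_one, Function.comp_def, List.map_const']


lemma pvFoldBars_length (c : Int × Int × Int) (f1 f2 f3 f4 : Int → Int) (l : List Int) :
    ∀ cv : List (List (Int × Int × Int)),
      (l.foldl (fun cv k => pvDrawRect cv (f1 k) (f2 k) (f3 k) (f4 k) c) cv).length = cv.length := by
  induction l with
  | nil => intro cv; rfl
  | cons a t ih => intro cv; rw [List.foldl_cons, ih, pvDrawRect_length]

lemma pvFoldBars_rowlen (W : Nat) (c : Int × Int × Int) (f1 f2 f3 f4 : Int → Int) (l : List Int) :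
    ∀ cv : List (List (Int × Int × Int)), (∀ r ∈ cv, r.length = W) →
      ∀ r ∈ l.foldl (fun cv k => pvDrawRect cv (f1 k) (f2 k) (f3 k) (f4 k) c) cv, r.length = W := by
  induction l with
  | nil => intro cv h; exact h
  | cons a t ih =>
    intro cv h
    rw [List.foldl_cons]
    exact ih _ (pvDrawRect_rowlen W cv _ _ _ _ _ h)

lemma pvGetMap {α : Type} (f : Int → α) (n : Int) (k : Nat) (h : (k : Int) < n) :
    ((PySem.List.pyRange 0 n 1).map f)[k]? = some (f (k : Int)) := by
  have hn : n = ((n.toNat : Nat) : Int) := by omega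
  rw [hn]
  exact PySem.List.getElem?_map_pyRange_zero f n.toNat k (by omega)

lemma pvCovB_eq (w h a b c d x y : Int) :
    pvContains (pvClampRect w h a b c d) x y = pvCovB w h a b c d x y := rfl

lemma pvPix_def (cv : List (List (Int × Int × Int))) (i j : Nat) :
    cv[i]?.bind (fun r => r[j]?) = pvPix cv i j := rfl

-- ===== VERDICT (by name: the statement is the Claim_ definition above) =====
set_option maxHeartbeats 2000000 in
theorem draw_histogram_bmp_spec : Claim_equal_draw_histogram_bmp := by
  intro hist width height hdom hpre
  obtain ⟨hw, hh, hlen⟩ := hpre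
  unfold Spec_draw_histogram_bmp
  have hWI : ((width.toNat : Nat) : Int) = width := Int.toNat_of_nonneg (by omega)
  have hHI : ((height.toNat : Nat) : Int) = height := Int.toNat_of_nonneg (by omega)
  have hW1 : 1 ≤ width.toNat := by omega
  have hH1 : 1 ≤ height.toNat := by omega
  have hA : draw_histogram_bmp hist width height = (width, height,
      (PySem.List.pyRange 0 256 1).foldl
        (fun cv k => pvDrawRect cv (pvParams hist width height k).1 (pvParams hist width height k).2.1
          (pvParams hist width height k).2.2.1 (pvParams hist width height k).2.2.2
          ((70 : Int), (130 : Int), (210 : Int)))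
        (pvDrawRect
          (pvDrawRect (pvMakeCanvas width height ((255 : Int), (255 : Int), (255 : Int)))
            60 20 (60 + 1) (height - 50) ((40 : Int), (40 : Int), (40 : Int)))
          60 (height - 50) (width - 30) ((height - 50) + 1) ((40 : Int), (40 : Int), (40 : Int)))) := rfl
  have hB : draw_histogram_bmp_alt hist width height = (width, height,
      (PySem.List.pyRange 0 height 1).map (fun y => (PySem.List.pyRange 0 width 1).map (fun x =>
        if ((PySem.List.pyRange 0 256 1).map (fun k =>
              pvClampRect width height (pvParams hist width height k).1 (pvParams hist width height k).2.1
                (pvParams hist width height k).2.2.1 (pvParams hist width height k).2.2.2)).any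
            (fun r => pvContains r x y) then ((70 : Int), (130 : Int), (210 : Int))
        else if ([pvClampRect width height 60 20 (60 + 1) (height - 50),
                  pvClampRect width height 60 (height - 50) (width - 30) ((height - 50) + 1)]).any
            (fun r => pvContains r x y) then ((40 : Int), (40 : Int), (40 : Int))
        else ((255 : Int), (255 : Int), (255 : Int))))) := rfl
  rw [hA, hB]
  simp only [Prod.mk.injEq]
  refine ⟨trivial, trivial, ?_⟩
  have hmkL : (pvMakeCanvas width height ((255 : Int), (255 : Int), (255 : Int))).length = height.toNat := by
    rw [pvMakeCanvas_eq]; simp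
  have hmkR : ∀ r ∈ pvMakeCanvas width height ((255 : Int), (255 : Int), (255 : Int)),
      r.length = width.toNat := by
    rw [pvMakeCanvas_eq]; intro r hr; rw [List.eq_of_mem_replicate hr]; simp
  have hc1L : (pvDrawRect (pvMakeCanvas width height ((255 : Int), (255 : Int), (255 : Int)))
      60 20 (60 + 1) (height - 50) ((40 : Int), (40 : Int), (40 : Int))).length = height.toNat := by
    rw [pvDrawRect_length]; exact hmkL
  have hc1R := pvDrawRect_rowlen width.toNat _ 60 20 (60 + 1) (height - 50)
    ((40 : Int), (40 : Int), (40 : Int)) hmkR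
  have hc2L : (pvDrawRect (pvDrawRect (pvMakeCanvas width height ((255 : Int), (255 : Int), (255 : Int)))
      60 20 (60 + 1) (height - 50) ((40 : Int), (40 : Int), (40 : Int)))
      60 (height - 50) (width - 30) ((height - 50) + 1) ((40 : Int), (40 : Int), (40 : Int))).length
      = height.toNat := by
    rw [pvDrawRect_length]; exact hc1L
  have hc2R := pvDrawRect_rowlen width.toNat _ 60 (height - 50) (width - 30) ((height - 50) + 1)
    ((40 : Int), (40 : Int), (40 : Int)) hc1R
  have hLlen := pvFoldBars_length ((70 : Int), (130 : Int), (210 : Int))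
    (fun k => (pvParams hist width height k).1) (fun k => (pvParams hist width height k).2.1)
    (fun k => (pvParams hist width height k).2.2.1) (fun k => (pvParams hist width height k).2.2.2)
    (PySem.List.pyRange 0 256 1)
    (pvDrawRect (pvDrawRect (pvMakeCanvas width height ((255 : Int), (255 : Int), (255 : Int)))
      60 20 (60 + 1) (height - 50) ((40 : Int), (40 : Int), (40 : Int)))
      60 (height - 50) (width - 30) ((height - 50) + 1) ((40 : Int), (40 : Int), (40 : Int)))
  beta_reduce at hLlen
  have hLrow := pvFoldBars_rowlen width.toNat ((70 : Int), (130 : Int), (210 : Int))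
    (fun k => (pvParams hist width height k).1) (fun k => (pvParams hist width height k).2.1)
    (fun k => (pvParams hist width height k).2.2.1) (fun k => (pvParams hist width height k).2.2.2)
    (PySem.List.pyRange 0 256 1)
    (pvDrawRect (pvDrawRect (pvMakeCanvas width height ((255 : Int), (255 : Int), (255 : Int)))
      60 20 (60 + 1) (height - 50) ((40 : Int), (40 : Int), (40 : Int)))
      60 (height - 50) (width - 30) ((height - 50) + 1) ((40 : Int), (40 : Int), (40 : Int))) hc2R
  beta_reduce at hLrow
  apply List.ext_getElem?
  intro i
  by_cases hi : i < height.toNat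
  · have hRi := pvGetMap (fun y => (PySem.List.pyRange 0 width 1).map (fun x =>
        if ((PySem.List.pyRange 0 256 1).map (fun k =>
              pvClampRect width height (pvParams hist width height k).1 (pvParams hist width height k).2.1
                (pvParams hist width height k).2.2.1 (pvParams hist width height k).2.2.2)).any
            (fun r => pvContains r x y) then ((70 : Int), (130 : Int), (210 : Int))
        else if ([pvClampRect width height 60 20 (60 + 1) (height - 50),
                  pvClampRect width height 60 (height - 50) (width - 30) ((height - 50) + 1)]).any
            (fun r => pvContains r x y) then ((40 : Int), (40 : Int), (40 : Int))
        else ((255 : Int), (255 : Int), (255 : Int)))) height i (by omega)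
    rw [hRi]
    beta_reduce
    have hLi : (i : Nat) < ((PySem.List.pyRange 0 256 1).foldl
        (fun cv k => pvDrawRect cv (pvParams hist width height k).1 (pvParams hist width height k).2.1
          (pvParams hist width height k).2.2.1 (pvParams hist width height k).2.2.2
          ((70 : Int), (130 : Int), (210 : Int)))
        (pvDrawRect (pvDrawRect (pvMakeCanvas width height ((255 : Int), (255 : Int), (255 : Int)))
          60 20 (60 + 1) (height - 50) ((40 : Int), (40 : Int), (40 : Int)))
          60 (height - 50) (width - 30) ((height - 50) + 1) ((40 : Int), (40 : Int), (40 : Int)))).length := by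
      rw [hLlen, hc2L]; exact hi
    rw [List.getElem?_eq_getElem hLi]
    refine congrArg some ?_
    apply List.ext_getElem?
    intro j
    by_cases hj : j < width.toNat
    · rw [pvGetMap (fun x =>
          if ((PySem.List.pyRange 0 256 1).map (fun k =>
                pvClampRect width height (pvParams hist width height k).1 (pvParams hist width height k).2.1
                  (pvParams hist width height k).2.2.1 (pvParams hist width height k).2.2.2)).any
              (fun r => pvContains r x (i : Int)) then ((70 : Int), (130 : Int), (210 : Int))
          else if ([pvClampRect width height 60 20 (60 + 1) (height - 50),
                    pvClampRect width height 60 (height - 50) (width - 30) ((height - 50) + 1)]).any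
              (fun r => pvContains r x (i : Int)) then ((40 : Int), (40 : Int), (40 : Int))
          else ((255 : Int), (255 : Int), (255 : Int))) width j (by omega)]
      have hpix := congrArg (fun o : Option (List (Int × Int × Int)) => o.bind (fun r => r[j]?))
        (List.getElem?_eq_getElem hLi)
      beta_reduce at hpix
      rw [Option.bind_some] at hpix
      rw [← hpix, pvPix_def]
      have h8 := pvFoldBars_pix width.toNat height.toNat hH1 hW1 ((70 : Int), (130 : Int), (210 : Int))
        (fun k => (pvParams hist width height k).1) (fun k => (pvParams hist width height k).2.1)
        (fun k => (pvParams hist width height k).2.2.1) (fun k => (pvParams hist width height k).2.2.2)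
        (PySem.List.pyRange 0 256 1)
        (pvDrawRect (pvDrawRect (pvMakeCanvas width height ((255 : Int), (255 : Int), (255 : Int)))
          60 20 (60 + 1) (height - 50) ((40 : Int), (40 : Int), (40 : Int)))
          60 (height - 50) (width - 30) ((height - 50) + 1) ((40 : Int), (40 : Int), (40 : Int)))
        hc2L hc2R i j hi hj
      beta_reduce at h8
      rw [h8]
      rw [pvDrawRect_pix _ width.toNat height.toNat hc1L hc1R hH1 hW1
        60 (height - 50) (width - 30) ((height - 50) + 1) ((40 : Int), (40 : Int), (40 : Int)) i j hi hj]
      rw [pvDrawRect_pix _ width.toNat height.toNat hmkL hmkR hH1 hW1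
        60 20 (60 + 1) (height - 50) ((40 : Int), (40 : Int), (40 : Int)) i j hi hj]
      have hmkpix : pvPix (pvMakeCanvas width height ((255 : Int), (255 : Int), (255 : Int))) i j
          = some ((255 : Int), (255 : Int), (255 : Int)) := by
        rw [pvMakeCanvas_eq]
        simp [pvPix, hi, hj]
      rw [hmkpix]
      rw [List.any_map]
      simp only [Function.comp_def, pvCovB_eq, List.any_cons, List.any_nil, hWI, hHI]
      split_ifs <;> simp_all
    · have hrl : _ := hLrow _ (List.getElem_mem hLi)
      rw [List.getElem?_eq_none (by rw [hrl]; omega),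
          List.getElem?_eq_none (by simp [PySem.List.length_pyRange_one]; omega)]
  · rw [List.getElem?_eq_none (by rw [hLlen, hc2L]; omega),
        List.getElem?_eq_none (by simp [PySem.List.length_pyRange_one]; omega)]
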